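-- pv_equiv track=rewrite | github.com/paulross/cpip | src/cpip/core/PpWhitespace.py | isBreakingWhitespace
-- ===== SOURCE A (Python) =====
-- LEX_WHITESPACE = set('\t\v\f\n ')
--
-- LEX_NEWLINE = '\n'
--
-- def isBreakingWhitespace(theCharS):
--     """Returns True if whitespace leads theChars and that whitespace
--     contains a newline."""
--     i = 0
--     #traceChars = [ord(x) for x in theCharS]
--     while i < len(theCharS) \
--     and theCharS[i] in LEX_WHITESPACE:
--         if theCharS[i] == LEX_NEWLINE:
--             return True
--         i += 1
--     return False
-- ===== SOURCE B (Python) =====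
-- LEX_WHITESPACE = set('\t\v\f\n ')
--
-- LEX_NEWLINE = '\n'
--
-- def isBreakingWhitespace(theCharS):
--     """Returns True if whitespace leads theChars and that whitespace
--     contains a newline."""
--     stripped = theCharS.lstrip('\t\v\f\n ')
--     prefix = theCharS[:len(theCharS) - len(stripped)]
--     return LEX_NEWLINE in prefix
-- ===== Notes on version B (the rewrite author's own statement) =====
-- stated objective: simpler
-- what changed: Replaces the explicit index loop with early return by a two-phase computation: lstrip isolates the leading-whitespace prefix, then a single membership test looks for the newline in that prefix.
import Mathlib
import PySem

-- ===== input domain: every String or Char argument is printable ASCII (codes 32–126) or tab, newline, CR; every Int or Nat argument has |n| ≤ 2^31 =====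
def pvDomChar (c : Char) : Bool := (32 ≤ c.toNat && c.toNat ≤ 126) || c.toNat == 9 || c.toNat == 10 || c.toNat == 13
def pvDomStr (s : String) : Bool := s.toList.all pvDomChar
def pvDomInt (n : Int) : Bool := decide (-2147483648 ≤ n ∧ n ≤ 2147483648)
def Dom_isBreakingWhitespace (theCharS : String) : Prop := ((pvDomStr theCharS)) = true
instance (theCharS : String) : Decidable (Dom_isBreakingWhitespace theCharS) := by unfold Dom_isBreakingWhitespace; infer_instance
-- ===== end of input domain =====

-- B replaces A's index loop with early return by lstrip-then-membership over the leading
-- whitespace prefix (objective: simpler); same return value on every string.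

-- ===== PORT A =====
-- module constant LEX_WHITESPACE = set('\t\v\f\n ') shared by both versions
def LEX_WHITESPACE : List Char := ['\t', '\x0b', '\x0c', '\n', ' ']

-- the while-loop of A: scan while current char is whitespace, return True at a newline
def pvLoopA : List Char → Bool
  | [] => false
  | c :: rest =>
    if LEX_WHITESPACE.contains c then
      if c = '\n' then true else pvLoopA rest
    else false

def isBreakingWhitespace (theCharS : String) : Bool := pvLoopA theCharS.toList

-- ===== PORT B =====
def isBreakingWhitespace_alt (theCharS : String) : Bool :=
  -- stripped = theCharS.lstrip('\t\v\f\n ')  (hand port of lstrip-with-chars: dropWhile; exact)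
  let cs := theCharS.toList
  let stripped := cs.dropWhile (fun c => LEX_WHITESPACE.contains c)
  -- prefix = theCharS[:len(theCharS) - len(stripped)]
  let pre := cs.take (cs.length - stripped.length)
  -- return LEX_NEWLINE in prefix
  pre.contains '\n'

-- ===== PRECONDITION & SPEC =====
def Spec_isBreakingWhitespace (theCharS : String) (out : Bool) : Prop := out = isBreakingWhitespace_alt theCharS
instance (theCharS : String) (out : Bool) : Decidable (Spec_isBreakingWhitespace theCharS out) := by unfold Spec_isBreakingWhitespace; infer_instance

-- ===== CLAIM (what is proved, stated in full; the proofs are below) =====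
def Claim_equal_isBreakingWhitespace : Prop := ∀ (theCharS : String), Dom_isBreakingWhitespace theCharS → Spec_isBreakingWhitespace theCharS (isBreakingWhitespace theCharS)

-- ===== LEMMAS AND PROOFS =====

theorem pvLoopA_eq_takeWhile (cs : List Char) :
    pvLoopA cs = (cs.takeWhile (fun c => LEX_WHITESPACE.contains c)).contains '\n' := by
  induction cs with
  | nil => rfl
  | cons c rest ih =>
    by_cases h : LEX_WHITESPACE.contains c
    · by_cases hc : c = '\n'
      · subst hc; simp [pvLoopA, List.takeWhile_cons, List.contains_eq_mem] at *
      · simp [pvLoopA, hc, List.takeWhile_cons, List.contains_eq_mem, ih, eq_comm] at *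
    · simp [pvLoopA, List.takeWhile_cons, List.contains_eq_mem] at *
      simp [h]

theorem take_sub_dropWhile (p : Char → Bool) (cs : List Char) :
    cs.take (cs.length - (cs.dropWhile p).length) = cs.takeWhile p := by
  have hlen : cs.length - (cs.dropWhile p).length = (cs.takeWhile p).length := by
    have h := congrArg List.length (List.takeWhile_append_dropWhile (p := p) (l := cs))
    simp only [List.length_append] at h
    omega
  rw [hlen]
  exact (List.prefix_iff_eq_take.mp (List.takeWhile_prefix p)).symm

theorem isBreakingWhitespace_spec : Claim_equal_isBreakingWhitespace := by
  intro s _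
  unfold Spec_isBreakingWhitespace isBreakingWhitespace isBreakingWhitespace_alt
  simp only [take_sub_dropWhile]
  exact pvLoopA_eq_takeWhile s.toList
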